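-- pv_equiv track=rewrite | github.com/Ashiq-am/Path-of-Python | 39.Python Programming Examples/Program to find sum of series 123 + 234+ 345 + . . . + n(n+1)(n+2)/Method 1 In this case loop will run n times and calculate the sum.py | sumOfSeries
-- ===== SOURCE A (Python) =====
-- def sumOfSeries(n):
-- 	sum = 0
-- 	i = 1
-- 	while i<=n:
-- 		sum = sum + i * (i + 1) * (
-- 								i + 2)
-- 		i = i + 1
-- 	return sum
-- ===== SOURCE B (Python) =====
-- def sumOfSeries(n):
--     # Closed form: sum_{i=1..n} i(i+1)(i+2) = n(n+1)(n+2)(n+3)/4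
--     if n < 1:
--         return 0
--     return n * (n + 1) * (n + 2) * (n + 3) // 4
-- ===== Notes on version B (the rewrite author's own statement) =====
-- stated objective: faster
-- what changed: Replaced the O(n) while-loop accumulation with the closed-form n(n+1)(n+2)(n+3)//4 (0 for n<1).
import Mathlib
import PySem

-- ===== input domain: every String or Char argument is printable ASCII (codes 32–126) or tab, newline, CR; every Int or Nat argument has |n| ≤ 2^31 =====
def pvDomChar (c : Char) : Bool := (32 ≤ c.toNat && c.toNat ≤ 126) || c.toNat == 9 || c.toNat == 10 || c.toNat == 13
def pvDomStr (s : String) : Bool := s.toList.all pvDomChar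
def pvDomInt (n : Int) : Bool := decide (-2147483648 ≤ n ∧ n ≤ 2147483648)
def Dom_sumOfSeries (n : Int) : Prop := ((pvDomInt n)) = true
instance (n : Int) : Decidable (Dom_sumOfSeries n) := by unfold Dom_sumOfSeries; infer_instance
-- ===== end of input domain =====

-- ===== PORT A =====
-- A's while-loop: sum += i*(i+1)*(i+2); i += 1, while i <= n
def sumOfSeriesLoop (n i sum : Int) : Int :=
  if _h : i ≤ n then sumOfSeriesLoop n (i + 1) (sum + i * (i + 1) * (i + 2)) else sum
termination_by (n + 1 - i).toNat
decreasing_by omega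

def sumOfSeries (n : Int) : Int := sumOfSeriesLoop n 1 0

-- ===== PORT B =====
-- closed form; `//` is Python floor division
def sumOfSeries_alt (n : Int) : Int :=
  if n < 1 then 0 else PySem.Int.floordiv (n * (n + 1) * (n + 2) * (n + 3)) 4

-- ===== PRECONDITION & SPEC =====
def Spec_sumOfSeries (n : Int) (out : Int) : Prop := out = sumOfSeries_alt n
instance (n : Int) (out : Int) : Decidable (Spec_sumOfSeries n out) := by unfold Spec_sumOfSeries; infer_instance

-- ===== CLAIM (what is proved, stated in full; the proofs are below) =====
def Claim_equal_sumOfSeries : Prop := ∀ (n : Int), Dom_sumOfSeries n → Spec_sumOfSeries n (sumOfSeries n)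

-- ===== LEMMAS AND PROOFS =====
-- loop invariant: 4·loop n i s = 4·s + n(n+1)(n+2)(n+3) − (i−1)i(i+1)(i+2) when i ≤ n+1
theorem sumOfSeriesLoop_inv (k : Nat) : ∀ (n i sum : Int), (n + 1 - i).toNat = k → i ≤ n + 1 →
    4 * sumOfSeriesLoop n i sum =
      4 * sum + n * (n + 1) * (n + 2) * (n + 3) - (i - 1) * i * (i + 1) * (i + 2) := by
  induction k with
  | zero =>
    intro n i sum hk hle
    have hi : i = n + 1 := by omega
    rw [sumOfSeriesLoop]
    simp only [show ¬ i ≤ n by omega, dite_false]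
    subst hi; ring
  | succ k ih =>
    intro n i sum hk hle
    have hin : i ≤ n := by omega
    rw [sumOfSeriesLoop]
    simp only [hin, dite_true]
    rw [ih n (i + 1) (sum + i * (i + 1) * (i + 2)) (by omega) (by omega)]
    ring

theorem sumOfSeriesLoop_neg (n : Int) (h : n < 1) : sumOfSeriesLoop n 1 0 = 0 := by
  rw [sumOfSeriesLoop]; simp only [show ¬ (1:Int) ≤ n by omega, dite_false]

-- ===== VERDICT (by name: the statement is the Claim_ definition above) =====
theorem sumOfSeries_spec : Claim_equal_sumOfSeries := by
  intro n _
  unfold Spec_sumOfSeries sumOfSeries sumOfSeries_alt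
  by_cases h : n < 1
  · simp only [h, if_true, sumOfSeriesLoop_neg n h]
  · simp only [h, if_false]
    have h1 : (1:Int) ≤ n + 1 := by omega
    have hinv := sumOfSeriesLoop_inv (n + 1 - 1).toNat n 1 0 rfl h1
    have h4 : 4 * sumOfSeriesLoop n 1 0 = n * (n + 1) * (n + 2) * (n + 3) := by
      rw [hinv]; ring
    rw [PySem.Int.floordiv_eq_ediv_of_pos (by norm_num), ← h4]
    omega
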